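-- pv_equiv track=rewrite | github.com/gclandorf-itrs/Geneos-Validation-Framework | validate_tests.py | closestMatch
-- ===== SOURCE A (Python) =====
-- def closestMatch(attribute, stringList):
--         attributeMatched=""
--         minDistance = None
--         attributeLowered = attribute.lower()
--         for string2 in stringList:
--                 if attributeLowered == string2.lower() :
--                         return (0, string2)
--                 distance = customHammingDistance(attributeLowered, string2.lower())
--                 if minDistance == None or distance < minDistance:
--                         minDistance=distance
--                         attributeMatched=string2
--         return (minDistance, attributeMatched)
--
-- def customHammingDistance(string1, string2):
--         distance = 0
--         index=0
--         for char in string1: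
--                 try:
--                         char2 = string2[index]
--                 except:
--                         #out of bounds, string 2 shorter than string 1
--                         distance+=1
--                 else:
--                         if char != string2[index]:
--                                 distance+=1
--                 index+=1
--         return distance
-- ===== SOURCE B (Python) =====
-- def _distance(s1, s2):
--     return sum(c1 != c2 for c1, c2 in zip(s1, s2)) + max(0, len(s1) - len(s2))
--
-- def closestMatch(attribute, stringList):
--     attributeLowered = attribute.lower()
--     for string2 in stringList:
--         if attributeLowered == string2.lower():
--             return (0, string2)
--     if not stringList:
--         return (None, "")
--     best = min(stringList, key=lambda s: _distance(attributeLowered, s.lower()))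
--     return (_distance(attributeLowered, best.lower()), best)
-- ===== Notes on version B (the rewrite author's own statement) =====
-- stated objective: simpler
-- what changed: Replaced the single accumulating loop (running min distance + matched string with early return) by an exact-match scan followed by min(stringList, key=distance), and replaced the index/try-except Hamming loop by a zip-based mismatch sum plus a length penalty.
import Mathlib
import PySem

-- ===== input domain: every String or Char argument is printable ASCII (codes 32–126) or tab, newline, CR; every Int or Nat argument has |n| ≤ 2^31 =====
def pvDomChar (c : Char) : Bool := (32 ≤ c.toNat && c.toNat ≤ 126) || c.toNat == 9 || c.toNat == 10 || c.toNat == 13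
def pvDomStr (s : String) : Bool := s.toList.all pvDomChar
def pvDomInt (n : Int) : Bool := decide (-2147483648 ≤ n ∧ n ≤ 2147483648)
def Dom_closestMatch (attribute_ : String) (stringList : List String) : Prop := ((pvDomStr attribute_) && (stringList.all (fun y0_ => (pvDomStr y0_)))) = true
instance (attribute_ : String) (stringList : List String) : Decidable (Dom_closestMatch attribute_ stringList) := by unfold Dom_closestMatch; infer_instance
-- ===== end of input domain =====

-- B replaces A's single accumulating loop by an exact-match pass followed by min(..., key=distance),
-- and the index/try-except Hamming loop by a zip-based sum; objective: simpler. Return value only; no mutation.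

-- ===== PORT A =====
-- loop 'for char in string1' of customHammingDistance: state (distance, index)
def customHammingDistance (string1 string2 : String) : Int :=
  (string1.toList.foldl
    (fun (st : Int × Int) (c : Char) =>
      match PySem.Str.pyGet? string2 st.2 with
      | none => (st.1 + 1, st.2 + 1)          -- except: out of bounds
      | some c2 => (if c ≠ c2 then st.1 + 1 else st.1, st.2 + 1))
    (0, 0)).1

-- the 'for string2 in stringList' loop with its early return
def closestMatchGo (attributeLowered : String) (l : List String)
    (minDistance : Option Int) (attributeMatched : String) : Option Int × String :=
  match l with
  | [] => (minDistance, attributeMatched)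
  | string2 :: rest =>
    if attributeLowered = PySem.Str.lower string2 then (some 0, string2)
    else
      let distance := customHammingDistance attributeLowered (PySem.Str.lower string2)
      match minDistance with
      | none => closestMatchGo attributeLowered rest (some distance) string2
      | some m =>
        if distance < m then closestMatchGo attributeLowered rest (some distance) string2
        else closestMatchGo attributeLowered rest (some m) attributeMatched

def closestMatch (attribute_ : String) (stringList : List String) : Option Int × String :=
  closestMatchGo (PySem.Str.lower attribute_) stringList none ""

-- ===== PORT B =====
-- _distance: sum(c1 != c2 for zip) + max(0, len(s1) - len(s2))
def pvDistanceAlt (s1 s2 : String) : Int :=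
  (((s1.toList.zip s2.toList).countP (fun p => p.1 != p.2) : Int))
    + max 0 ((s1.toList.length : Int) - (s2.toList.length : Int))

def closestMatch_alt (attribute_ : String) (stringList : List String) : Option Int × String :=
  let attributeLowered := PySem.Str.lower attribute_
  match stringList.find? (fun s => attributeLowered = PySem.Str.lower s) with
  | some s => (some 0, s)
  | none =>
    if stringList = [] then (none, "")
    else
      match PySem.List.min? stringList (fun s => pvDistanceAlt attributeLowered (PySem.Str.lower s)) with
      | some best => (some (pvDistanceAlt attributeLowered (PySem.Str.lower best)), best)
      | none => (none, "")

-- ===== PRECONDITION & SPEC =====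
def Spec_closestMatch (attribute_ : String) (stringList : List String) (out : Option Int × String) : Prop := out = closestMatch_alt attribute_ stringList
instance (attribute_ : String) (stringList : List String) (out : Option Int × String) : Decidable (Spec_closestMatch attribute_ stringList out) := by unfold Spec_closestMatch; infer_instance

-- ===== CLAIM (what is proved, stated in full; the proofs are below) =====
def Claim_equal_closestMatch : Prop := ∀ (attribute_ : String) (stringList : List String), Dom_closestMatch attribute_ stringList → Spec_closestMatch attribute_ stringList (closestMatch attribute_ stringList)

-- ===== LEMMAS AND PROOFS =====

-- proof-only helpers: the two loops' "keep the closer string" step, as named functions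
def pickA (al : String) : Option String → String → Option String := fun a x =>
  match a with
  | none => some x
  | some m =>
    if customHammingDistance al (PySem.Str.lower x) < customHammingDistance al (PySem.Str.lower m)
    then some x else some m

def pickAlt (al : String) : Option String → String → Option String := fun a x =>
  match a with
  | none => some x
  | some m =>
    if pvDistanceAlt al (PySem.Str.lower x) < pvDistanceAlt al (PySem.Str.lower m)
    then some x else some m

-- A's hamming fold, started at index i, adds B's zip-distance against (drop i)
theorem customHamming_go (s2 : String) (l1 : List Char) : ∀ (i : ℕ) (d : Int),
    (l1.foldl
      (fun (st : Int × Int) (c : Char) =>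
        match PySem.Str.pyGet? s2 st.2 with
        | none => (st.1 + 1, st.2 + 1)
        | some c2 => (if c ≠ c2 then st.1 + 1 else st.1, st.2 + 1))
      (d, (i : Int))).1
    = d + (((l1.zip (s2.toList.drop i)).countP (fun p => p.1 != p.2) : Int))
        + max 0 ((l1.length : Int) - ((s2.toList.drop i).length : Int)) := by
  induction l1 with
  | nil =>
    intro i d
    simp
  | cons c t ih =>
    intro i d
    have hcast : ((i : ℕ) : Int) + 1 = (((i + 1 : ℕ)) : Int) := by push_cast; ring
    by_cases h : i < s2.toList.length
    · have hg : PySem.Str.pyGet? s2 ((i : ℕ) : Int) = some s2.toList[i] := by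
        rw [PySem.Str.pyGet?_natCast]; exact List.getElem?_eq_getElem h
      have hd : s2.toList.drop i = s2.toList[i] :: s2.toList.drop (i + 1) :=
        List.drop_eq_getElem_cons h
      simp only [List.foldl_cons, hg, hcast, hd, List.zip_cons_cons, List.countP_cons,
        bne_iff_ne]
      split_ifs with hc
      · rw [ih (i + 1) (d + 1)]
        simp only [List.length_cons, List.length_drop]
        push_cast
        omega
      · rw [ih (i + 1) d]
        simp only [List.length_cons, List.length_drop]
        push_cast
        omega
    · have hg : PySem.Str.pyGet? s2 ((i : ℕ) : Int) = none := by
        rw [PySem.Str.pyGet?_natCast]; exact List.getElem?_eq_none (by omega)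
      have hd : s2.toList.drop i = [] := List.drop_eq_nil_of_le (by omega)
      have hd1 : s2.toList.drop (i + 1) = [] := List.drop_eq_nil_of_le (by omega)
      simp only [List.foldl_cons, hg, hcast, hd]
      rw [ih (i + 1) (d + 1), hd1]
      simp only [List.zip_nil_right, List.countP_nil, List.length_nil, List.length_cons,
        Nat.cast_zero, Nat.cast_add, Nat.cast_one]
      omega

theorem customHamming_eq (s1 s2 : String) : customHammingDistance s1 s2 = pvDistanceAlt s1 s2 := by
  have h := customHamming_go s2 s1.toList 0 0
  simpa [customHammingDistance, pvDistanceAlt] using h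

theorem pick_eq (al : String) : pickA al = pickAlt al := by
  funext a x
  cases a <;> simp [pickA, pickAlt, customHamming_eq]

-- a fold whose step preserves isSome stays some
theorem foldl_some {α : Type} (f : Option α → α → Option α)
    (hf : ∀ m y, (f (some m) y).isSome) :
    ∀ (l : List α) (x : α), ∃ b, l.foldl f (some x) = some b := by
  intro l
  induction l with
  | nil => exact fun x => ⟨x, rfl⟩
  | cons y t ih =>
    intro x
    rcases Option.isSome_iff_exists.mp (hf x y) with ⟨z, hz⟩
    simpa [List.foldl_cons, hz] using ih z

theorem pickAlt_some (al : String) : ∀ m y, ((pickAlt al) (some m) y).isSome := by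
  intro m y
  simp only [pickAlt]
  split <;> rfl

-- Python min(xs, key) is the first-wins fold of the pick step
theorem min?_eq_foldl_pickAlt (al : String) (l : List String) :
    PySem.List.min? l (fun s => pvDistanceAlt al (PySem.Str.lower s)) = l.foldl (pickAlt al) none := by
  unfold PySem.List.min?
  congr 1
  funext a x
  cases a <;> rfl

-- A's main loop, from a state abstracted as an optional current best,
-- is find?-then-fold-of-pickA
theorem closestMatchGo_spec (al : String) (l : List String) :
    ∀ (acc : Option String) (m0 : String),
    closestMatchGo al l (acc.map (fun s => customHammingDistance al (PySem.Str.lower s)))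
        (acc.getD m0)
    = match l.find? (fun s => al = PySem.Str.lower s) with
      | some s => (some 0, s)
      | none =>
        match l.foldl (pickA al) acc with
        | none => (none, m0)
        | some b => (some (customHammingDistance al (PySem.Str.lower b)), b) := by
  induction l with
  | nil =>
    intro acc m0
    cases acc <;> simp [closestMatchGo]
  | cons s t ih =>
    intro acc m0
    by_cases heq : al = PySem.Str.lower s
    · cases acc <;> simp [closestMatchGo, heq]
    · have hfind : (s :: t).find? (fun x => al = PySem.Str.lower x)
          = t.find? (fun x => al = PySem.Str.lower x) := by
        simp [List.find?_cons, heq]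
      cases acc with
      | none =>
        simp only [Option.map_none, Option.getD_none, closestMatchGo, if_neg heq]
        have := ih (some s) m0
        simp only [Option.map_some, Option.getD_some] at this
        rw [this, hfind, List.foldl_cons]
        rfl
      | some b =>
        simp only [Option.map_some, Option.getD_some, closestMatchGo, if_neg heq]
        by_cases hlt : customHammingDistance al (PySem.Str.lower s)
            < customHammingDistance al (PySem.Str.lower b)
        · simp only [if_pos hlt]
          have := ih (some s) m0
          simp only [Option.map_some, Option.getD_some] at this
          rw [this, hfind, List.foldl_cons]
          simp [pickA, hlt]
        · simp only [if_neg hlt]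
          have := ih (some b) b
          simp only [Option.map_some, Option.getD_some] at this
          rw [this, hfind, List.foldl_cons]
          have hstep : (pickA al) (some b) s = some b := by simp [pickA, hlt]
          rw [hstep]
          obtain ⟨bb, hbb⟩ := foldl_some (pickA al)
            (by rw [pick_eq]; exact pickAlt_some al) t b
          cases hf : t.find? (fun x => al = PySem.Str.lower x) with
          | some w => simp
          | none => rw [hbb]

-- ===== VERDICT (by name: the statement is the Claim_ definition above) =====
theorem closestMatch_spec : Claim_equal_closestMatch := by
  intro attribute_ stringList _
  unfold Spec_closestMatch closestMatch closestMatch_alt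
  have h := closestMatchGo_spec (PySem.Str.lower attribute_) stringList none ""
  simp only [Option.map_none, Option.getD_none] at h
  rw [h, pick_eq]
  simp only [customHamming_eq, min?_eq_foldl_pickAlt]
  cases hf : stringList.find? (fun s => decide (PySem.Str.lower attribute_ = PySem.Str.lower s)) with
  | some s => simp [hf]
  | none =>
    simp only [hf]
    cases stringList with
    | nil => simp
    | cons x t =>
      simp only [List.foldl_cons]
      have hstep : (pickAlt (PySem.Str.lower attribute_)) none x = some x := rfl
      rw [hstep]
      obtain ⟨b, hb⟩ := foldl_some (pickAlt (PySem.Str.lower attribute_)) (pickAlt_some _) t x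
      rw [hb]
      simp
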